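-- pv_equiv track=rewrite | github.com/lbh848/Comfyui-soya-custom-nodes | character_identifier.py | parse_character_enhance
-- ===== SOURCE A (Python) =====
-- def parse_character_enhance(text):
--     """Parse character enhancement prompts in ## 캐릭터이름 format"""
--     char_enhance = {}
--     if not text or not text.strip():
--         return char_enhance
--
--     lines = text.split('\n')
--     current_char = None
--     current_tags = []
--
--     for line in lines:
--         stripped = line.strip()
--         if stripped.startswith('##'):
--             # Save previous character if exists
--             if current_char and current_tags:
--                 char_enhance[current_char] = ', '.join(current_tags)
--             # Start new character
--             current_char = stripped.replace('##', '').strip().replace(' ', '_').lower()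
--             current_tags = []
--         elif current_char and stripped:
--             # Add tags to current character
--             tags = [t.strip() for t in stripped.split(',') if t.strip()]
--             current_tags.extend(tags)
--
--     # Save last character
--     if current_char and current_tags:
--         char_enhance[current_char] = ', '.join(current_tags)
--
--     return char_enhance
-- ===== SOURCE B (Python) =====
-- def parse_character_enhance(text):
--     """Parse character enhancement prompts in ## name format (section-scanner rewrite)."""
--     lines = [ln.strip() for ln in text.split('\n')]
--     n = len(lines)
--     result = {}
--     i = 0
--     while i < n:
--         s = lines[i]
--         i += 1
--         if not s.startswith('##'):
--             continue
--         name = s.replace('##', '').strip().replace(' ', '_').lower()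
--         body = []
--         while i < n and not lines[i].startswith('##'):
--             body.append(lines[i])
--             i += 1
--         tags = [t.strip() for ln in body for t in ln.split(',') if t.strip()]
--         if name and tags:
--             result[name] = ', '.join(tags)
--     return result
-- ===== Notes on version B (the rewrite author's own statement) =====
-- stated objective: alternative
-- what changed: Replaces A's line-by-line state machine over (current_char, current_tags) by a section scanner: strip all lines once, then repeatedly find a header and collect its whole body in an inner scan before emitting the section.
import Mathlib
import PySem

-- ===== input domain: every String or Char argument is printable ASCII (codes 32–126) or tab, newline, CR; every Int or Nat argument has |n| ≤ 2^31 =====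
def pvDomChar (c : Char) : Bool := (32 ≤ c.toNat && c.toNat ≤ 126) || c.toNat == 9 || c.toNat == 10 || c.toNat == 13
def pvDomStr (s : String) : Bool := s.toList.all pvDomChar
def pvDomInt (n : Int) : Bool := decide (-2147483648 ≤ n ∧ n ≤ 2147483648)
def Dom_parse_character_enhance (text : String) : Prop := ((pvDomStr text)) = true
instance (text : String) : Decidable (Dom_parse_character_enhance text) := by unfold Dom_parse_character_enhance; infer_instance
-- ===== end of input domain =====

-- B replaces A's running current_char/current_tags state machine by a section scanner
-- (find a header, collect its whole body, emit the section, continue); objective: alternative decomposition.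

-- shared pure helpers (the identical expressions occur verbatim in both Pythons)
-- stripped.replace('##', '').strip().replace(' ', '_').lower()
def pvHeaderName (stripped : String) : String :=
  PySem.Str.lower (PySem.Str.replace (PySem.Str.strip (PySem.Str.replace stripped "##" "")) " " "_")

-- [t.strip() for t in s.split(',') if t.strip()]
def pvLineTokens (s : String) : List String :=
  (((PySem.Str.split? s ",").getD []).map PySem.Str.strip).filter (· ≠ "")

-- ===== PORT A =====
-- if current_char and current_tags: char_enhance[current_char] = ', '.join(current_tags)
def pvA_save (d : PySem.Dict String String) (oc : Option String) (tags : List String) :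
    PySem.Dict String String :=
  match oc with
  | some c => if c ≠ "" ∧ tags ≠ [] then d.insert c (PySem.Str.join ", " tags) else d
  | none => d

-- the body of A's "for line in lines" loop; state = (char_enhance, current_char, current_tags)
def pvA_step (st : PySem.Dict String String × Option String × List String) (line : String) :
    PySem.Dict String String × Option String × List String :=
  let stripped := PySem.Str.strip line
  if PySem.Str.startswith stripped "##" then
    (pvA_save st.1 st.2.1 st.2.2, some (pvHeaderName stripped), [])
  else
    match st.2.1 with
    | some c => if c ≠ "" ∧ stripped ≠ "" then (st.1, st.2.1, st.2.2 ++ pvLineTokens stripped) else st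
    | none => st

def parse_character_enhance (text : String) : List (String × String) :=
  if text = "" ∨ PySem.Str.strip text = "" then (PySem.Dict.empty : PySem.Dict String String).items
  else
    let lines := (PySem.Str.split? text "\n").getD []
    let fin := lines.foldl pvA_step ((PySem.Dict.empty : PySem.Dict String String), none, [])
    (pvA_save fin.1 fin.2.1 fin.2.2).items

-- ===== PORT B =====
-- the inner "while i < n and not lines[i].startswith('##')" scan: (body, rest)
def pvCollectBody : List String → List String × List String
  | [] => ([], [])
  | s :: rest =>
    if PySem.Str.startswith s "##" then ([], s :: rest)
    else
      let br := pvCollectBody rest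
      (s :: br.1, br.2)

theorem pvCollectBody_snd_le (l : List String) : (pvCollectBody l).2.length ≤ l.length := by
  induction l with
  | nil => simp [pvCollectBody]
  | cons s rest ih =>
    simp only [pvCollectBody]
    split
    · simp
    · simpa using Nat.le_succ_of_le ih

-- the outer "while i < n" loop of B
def pvGoB : List String → PySem.Dict String String → PySem.Dict String String
  | [], d => d
  | s :: rest, d =>
    if PySem.Str.startswith s "##" then
      let name := pvHeaderName s
      let br := pvCollectBody rest
      let tags := br.1.flatMap pvLineTokens
      pvGoB br.2 (if name ≠ "" ∧ tags ≠ [] then d.insert name (PySem.Str.join ", " tags) else d)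
    else pvGoB rest d
termination_by l => l.length
decreasing_by
  · exact Nat.lt_succ_of_le (pvCollectBody_snd_le rest)
  · simp

def parse_character_enhance_alt (text : String) : List (String × String) :=
  let lines := ((PySem.Str.split? text "\n").getD []).map PySem.Str.strip
  (pvGoB lines (PySem.Dict.empty : PySem.Dict String String)).items

-- ===== PRECONDITION & SPEC =====
def Spec_parse_character_enhance (text : String) (out : List (String × String)) : Prop := out = parse_character_enhance_alt text
instance (text : String) (out : List (String × String)) : Decidable (Spec_parse_character_enhance text out) := by unfold Spec_parse_character_enhance; infer_instance

-- ===== CLAIM (what is proved, stated in full; the proofs are below) =====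
def Claim_equal_parse_character_enhance : Prop := ∀ (text : String), Dom_parse_character_enhance text → Spec_parse_character_enhance text (parse_character_enhance text)

-- ===== LEMMAS AND PROOFS =====

def pvNotHeader (s : String) : Bool := !PySem.Str.startswith s "##"

theorem pvLineTokens_empty : pvLineTokens "" = [] := by decide

theorem pvHH : "##".toList = ['#', '#'] := rfl

theorem pvCollectBody_eq (l : List String) :
    pvCollectBody l = (l.takeWhile pvNotHeader, l.dropWhile pvNotHeader) := by
  induction l with
  | nil => simp [pvCollectBody]
  | cons s rest ih =>
    by_cases h : PySem.Chars.startswith s.toList ['#', '#'] = true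
    · simp [pvCollectBody, h, pvNotHeader]
    · simp [pvCollectBody, h, pvNotHeader, ih]

-- proof-side description of A's residual work from state (d, some c, tags)
def pvGoB2 (ls : List String) (c : String) (tags : List String) (d : PySem.Dict String String) :
    PySem.Dict String String :=
  let tags' := tags ++ (if c = "" then [] else (ls.takeWhile pvNotHeader).flatMap pvLineTokens)
  pvGoB (ls.dropWhile pvNotHeader)
    (if c ≠ "" ∧ tags' ≠ [] then d.insert c (PySem.Str.join ", " tags') else d)

theorem pvGoB2_header (ss : String) (ls : List String) (d : PySem.Dict String String)
    (h : PySem.Str.startswith ss "##" = true) :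
    pvGoB2 ls (pvHeaderName ss) [] d = pvGoB (ss :: ls) d := by
  rw [pvGoB2, pvGoB, if_pos h, pvCollectBody_eq]
  by_cases hn : pvHeaderName ss = ""
  · simp [hn]
  · simp [hn]

theorem pvL2 (lines : List String) (c : String) (tags : List String) (d : PySem.Dict String String) :
    (fun fin => pvA_save fin.1 fin.2.1 fin.2.2) (lines.foldl pvA_step (d, some c, tags))
      = pvGoB2 (lines.map PySem.Str.strip) c tags d := by
  induction lines generalizing c tags d with
  | nil => simp [pvA_save, pvGoB2, pvGoB]
  | cons s rest ih =>
    rw [List.foldl_cons, List.map_cons]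
    by_cases hs : PySem.Chars.startswith (PySem.Chars.strip s.toList) ['#', '#'] = true
    · have hstep : pvA_step (d, some c, tags) s
          = (pvA_save d (some c) tags, some (pvHeaderName (PySem.Str.strip s)), []) := by
        simp [pvA_step, pvHH, hs]
      have hs2 : PySem.Str.startswith (PySem.Str.strip s) "##" = true := by simp [pvHH, hs]
      rw [hstep, ih, pvGoB2_header _ _ _ hs2]
      simp [pvGoB2, pvNotHeader, pvHH, hs, pvA_save]
    · by_cases hc : c = ""
      · have hstep : pvA_step (d, some c, tags) s = (d, some c, tags) := by
          simp [pvA_step, pvHH, hs, hc]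
        rw [hstep, ih]
        simp [pvGoB2, pvNotHeader, pvHH, hs, hc]
      · by_cases he : PySem.Str.strip s = ""
        · have hstep : pvA_step (d, some c, tags) s = (d, some c, tags) := by
            simp [pvA_step, pvHH, he, PySem.Chars.startswith]
          rw [hstep, ih]
          simp [pvGoB2, pvNotHeader, pvHH, hc, he, pvLineTokens_empty, PySem.Chars.startswith]
        · have hstep : pvA_step (d, some c, tags) s
              = (d, some c, tags ++ pvLineTokens (PySem.Str.strip s)) := by
            simp [pvA_step, pvHH, hs, hc, he]
          rw [hstep, ih]
          simp [pvGoB2, pvNotHeader, pvHH, hs, hc, List.append_assoc]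

theorem pvL1 (lines : List String) (d : PySem.Dict String String) :
    (fun fin => pvA_save fin.1 fin.2.1 fin.2.2) (lines.foldl pvA_step (d, none, []))
      = pvGoB (lines.map PySem.Str.strip) d := by
  induction lines generalizing d with
  | nil => simp [pvA_save, pvGoB]
  | cons s rest ih =>
    rw [List.foldl_cons, List.map_cons]
    by_cases hs : PySem.Chars.startswith (PySem.Chars.strip s.toList) ['#', '#'] = true
    · have hstep : pvA_step (d, none, []) s
          = (d, some (pvHeaderName (PySem.Str.strip s)), []) := by
        simp [pvA_step, pvHH, hs, pvA_save]
      have hs2 : PySem.Str.startswith (PySem.Str.strip s) "##" = true := by simp [pvHH, hs]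
      rw [hstep, pvL2, pvGoB2_header _ _ _ hs2]
    · have hstep : pvA_step (d, none, []) s = (d, none, []) := by
        simp [pvA_step, pvHH, hs]
      rw [hstep, ih, pvGoB]
      simp [pvHH, hs]

theorem pvGoB_all_nonheader (ls : List String) (d : PySem.Dict String String)
    (h : ∀ s ∈ ls, PySem.Str.startswith s "##" = false) : pvGoB ls d = d := by
  induction ls with
  | nil => simp [pvGoB]
  | cons s rest ih =>
    have hs := h s (by simp)
    simp only [PySem.Str.startswith_eq] at hs
    rw [pvGoB, if_neg (by rw [show ("##".toList) = ['#', '#'] from rfl] at hs; simp [hs])]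
    exact ih (fun x hx => h x (by simp [hx]))

theorem pvStrip_all (cs : List Char) (h : PySem.Chars.strip cs = []) :
    ∀ ch ∈ cs, PySem.Chars.isspace ch = true := by
  have h2 : List.dropWhile PySem.Chars.isspace
      (List.dropWhile PySem.Chars.isspace cs).reverse = [] := by
    simp only [PySem.Chars.strip, PySem.Chars.rstrip, PySem.Chars.lstrip] at h
    simpa using h
  have hdw : ∀ x ∈ List.dropWhile PySem.Chars.isspace cs, PySem.Chars.isspace x = true := by
    intro x hx
    exact List.dropWhile_eq_nil_iff.mp h2 x (by simpa using hx)
  intro ch hch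
  rcases List.mem_append.mp
      (by rw [List.takeWhile_append_dropWhile (p := PySem.Chars.isspace)]; exact hch) with h1 | h1
  · exact List.mem_takeWhile_imp h1
  · exact hdw ch h1

theorem pvAll_strip (cs : List Char) (h : ∀ ch ∈ cs, PySem.Chars.isspace ch = true) :
    PySem.Chars.strip cs = [] := by
  have h1 : List.dropWhile PySem.Chars.isspace cs = [] := List.dropWhile_eq_nil_iff.mpr h
  simp [PySem.Chars.strip, PySem.Chars.lstrip, PySem.Chars.rstrip, h1]

theorem pvGo_chars (sep : List Char) (fuel : Nat) (l cur : List Char) (acc : List (List Char)) :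
    ∀ p ∈ PySem.Chars.splitOn.go sep fuel l cur acc, ∀ ch ∈ p,
      ch ∈ l ∨ ch ∈ cur ∨ ∃ q ∈ acc, ch ∈ q := by
  induction fuel generalizing l cur acc with
  | zero =>
    intro p hp ch hch
    simp only [PySem.Chars.splitOn.go] at hp
    rcases (by simpa using hp : p ∈ acc ∨ p = cur.reverse ++ l) with hp1 | hp1
    · exact Or.inr (Or.inr ⟨p, hp1, hch⟩)
    · subst hp1
      rcases List.mem_append.mp hch with h1 | h1
      · exact Or.inr (Or.inl (by simpa using h1))
      · exact Or.inl h1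
  | succ fuel ih =>
    intro p hp ch hch
    cases l with
    | nil =>
      simp only [PySem.Chars.splitOn.go] at hp
      rcases (by simpa using hp : p ∈ acc ∨ p = cur.reverse) with hp1 | hp1
      · exact Or.inr (Or.inr ⟨p, hp1, hch⟩)
      · subst hp1; exact Or.inr (Or.inl (by simpa using hch))
    | cons c restl =>
      rw [PySem.Chars.splitOn.go] at hp
      by_cases hpre : sep.isPrefixOf (c :: restl) = true
      · rw [if_pos hpre] at hp
        rcases ih _ _ _ p hp ch hch with h1 | h1 | ⟨q, hq, hcq⟩
        · exact Or.inl (List.mem_of_mem_drop h1)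
        · exact absurd h1 (List.not_mem_nil)
        · rcases List.mem_cons.mp hq with hq1 | hq1
          · subst hq1; exact Or.inr (Or.inl (by simpa using hcq))
          · exact Or.inr (Or.inr ⟨q, hq1, hcq⟩)
      · rw [if_neg hpre] at hp
        rcases ih _ _ _ p hp ch hch with h1 | h1 | ⟨q, hq, hcq⟩
        · exact Or.inl (List.mem_cons_of_mem _ h1)
        · rcases List.mem_cons.mp h1 with h2 | h2
          · subst h2; exact Or.inl (List.mem_cons_self)
          · exact Or.inr (Or.inl h2)
        · exact Or.inr (Or.inr ⟨q, hq, hcq⟩)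

-- ===== VERDICT (by name: the statement is the Claim_ definition above) =====
theorem pvLines_space (text : String) (h : PySem.Str.strip text = "")
    (t : String) (ht : t ∈ ((PySem.Str.split? text "\n").getD []).map PySem.Str.strip) :
    PySem.Str.startswith t "##" = false := by
  have hsp : ∀ ch ∈ text.toList, PySem.Chars.isspace ch = true := by
    apply pvStrip_all
    have := congrArg String.toList h
    simpa [PySem.Str.toList_strip] using this
  obtain ⟨lraw, hl, rfl⟩ := List.mem_map.mp ht
  simp only [PySem.Str.split?, PySem.Chars.split?] at hl
  have hl2 : lraw ∈ (PySem.Chars.splitOn text.toList "\n".toList).map String.ofList := by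
    simpa using hl
  obtain ⟨p, hp, rfl⟩ := List.mem_map.mp hl2
  have hpsp : ∀ ch ∈ p, PySem.Chars.isspace ch = true := by
    intro ch hch
    rcases pvGo_chars "\n".toList (text.toList.length + 1) text.toList [] [] p hp ch hch with
      h1 | h1 | ⟨q, hq, _⟩
    · exact hsp ch h1
    · exact absurd h1 (List.not_mem_nil)
    · exact absurd hq (List.not_mem_nil)
  have hstrip : PySem.Chars.strip p = [] := pvAll_strip p hpsp
  simp [PySem.Str.toList_strip, String.toList_ofList, hstrip, PySem.Chars.startswith]

theorem parse_character_enhance_spec : Claim_equal_parse_character_enhance := by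
  unfold Claim_equal_parse_character_enhance Spec_parse_character_enhance
  intro text _
  by_cases hg : text = "" ∨ PySem.Str.strip text = ""
  · rw [parse_character_enhance, if_pos hg, parse_character_enhance_alt]
    rcases hg with hg | hg
    · subst hg
      have hlines : List.map PySem.Str.strip ((PySem.Str.split? "" "\n").getD []) = [""] := by
        decide
      rw [hlines, pvGoB_all_nonheader _ _ (by decide)]
    · rw [pvGoB_all_nonheader _ _ (fun t ht => pvLines_space text hg t ht)]
  · rw [parse_character_enhance, if_neg hg, parse_character_enhance_alt]
    exact congrArg PySem.Dict.items (pvL1 _ _)
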